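-- pv_equiv track=rewrite | github.com/semh59/LOJINEXT | app/database/repositories/audit_repo.py | _normalize_event_type
-- ===== SOURCE A (Python) =====
-- from typing import Any, Dict, List, Optional
--
-- def _normalize_event_type(
--     islem_tipi: str, changes: List[Dict[str, Any]]
-- ) -> str:
--     if islem_tipi == "INSERT":
--         return "CREATE"
--     if islem_tipi == "DELETE":
--         return "DELETE"
--
--     changed_fields = {change["alan"] for change in changes}
--     if "durum" in changed_fields:
--         return "STATUS_CHANGE"
--     if "tahmini_tuketim" in changed_fields or "tahmin_meta" in changed_fields:
--         return "PREDICTION_REFRESH"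
--     if {"tuketim", "dagitilan_yakit", "periyot_id"} & changed_fields:
--         return "RECONCILIATION"
--     return "UPDATE"
-- ===== SOURCE B (Python) =====
-- _RANK = {
--     "durum": 0,
--     "tahmini_tuketim": 1,
--     "tahmin_meta": 1,
--     "tuketim": 2,
--     "dagitilan_yakit": 2,
--     "periyot_id": 2,
-- }
-- _EVENT = ["STATUS_CHANGE", "PREDICTION_REFRESH", "RECONCILIATION", "UPDATE"]
--
--
-- def _normalize_event_type(islem_tipi, changes):
--     if islem_tipi == "INSERT":
--         return "CREATE"
--     if islem_tipi == "DELETE":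
--         return "DELETE"
--     best = 3
--     for change in changes:
--         best = min(best, _RANK.get(change["alan"], 3))
--     return _EVENT[best]
-- ===== Notes on version B (the rewrite author's own statement) =====
-- stated objective: alternative
-- what changed: Replaces the build-a-set-then-run-four-membership-tests chain by a priority table: one fold over the changes tracking the minimum rank of any significant field, indexing an event list at the end.
import Mathlib
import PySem

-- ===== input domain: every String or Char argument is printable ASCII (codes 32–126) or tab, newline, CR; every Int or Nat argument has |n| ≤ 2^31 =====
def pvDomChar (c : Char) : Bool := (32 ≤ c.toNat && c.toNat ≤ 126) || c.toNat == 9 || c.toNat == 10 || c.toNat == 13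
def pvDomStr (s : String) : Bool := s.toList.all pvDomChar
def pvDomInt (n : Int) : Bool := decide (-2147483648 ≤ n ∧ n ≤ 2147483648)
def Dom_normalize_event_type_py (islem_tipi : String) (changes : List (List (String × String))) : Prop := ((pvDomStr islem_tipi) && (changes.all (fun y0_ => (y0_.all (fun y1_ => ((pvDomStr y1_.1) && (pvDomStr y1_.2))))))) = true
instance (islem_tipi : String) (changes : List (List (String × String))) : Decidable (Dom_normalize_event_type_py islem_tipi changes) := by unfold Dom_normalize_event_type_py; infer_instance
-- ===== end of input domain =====

-- B replaces A's set-then-membership-test chain by a priority table and a single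
-- min-rank fold (objective: alternative decomposition, same cost).


-- ===== PORT A =====
-- change["alan"]; Pre_ guarantees the key is present, so the `.getD ""` default never fires.
def pvAlan (c : List (String × String)) : String :=
  ((PySem.Dict.mk c).get? "alan").getD ""

def normalize_event_type_py (islem_tipi : String) (changes : List (List (String × String))) : String :=
  if islem_tipi = "INSERT" then "CREATE"
  else if islem_tipi = "DELETE" then "DELETE"
  else
    let changed_fields : PySem.Set String := PySem.Set.ofList (changes.map pvAlan)
    if PySem.Set.contains changed_fields "durum" then "STATUS_CHANGE"
    else if PySem.Set.contains changed_fields "tahmini_tuketim" || PySem.Set.contains changed_fields "tahmin_meta" then "PREDICTION_REFRESH"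
    else if PySem.Set.inter (PySem.Set.ofList ["tuketim", "dagitilan_yakit", "periyot_id"]) changed_fields ≠ [] then "RECONCILIATION"
    else "UPDATE"

-- ===== PORT B =====
def pvRANK : PySem.Dict String Int :=
  PySem.Dict.mk [("durum", 0), ("tahmini_tuketim", 1), ("tahmin_meta", 1),
                 ("tuketim", 2), ("dagitilan_yakit", 2), ("periyot_id", 2)]

def pvEVENT : List String := ["STATUS_CHANGE", "PREDICTION_REFRESH", "RECONCILIATION", "UPDATE"]

def normalize_event_type_py_alt (islem_tipi : String) (changes : List (List (String × String))) : String :=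
  if islem_tipi = "INSERT" then "CREATE"
  else if islem_tipi = "DELETE" then "DELETE"
  else
    let best : Int := changes.foldl (fun b c => min b (pvRANK.getD (pvAlan c) 3)) 3
    PySem.List.pyGetD pvEVENT best "UPDATE"

-- ===== PRECONDITION & SPEC =====
-- Pre_ excludes exactly the inputs where the Python A raises KeyError: a change dict
-- without key "alan" when islem_tipi is neither "INSERT" nor "DELETE".
def Pre_normalize_event_type_py (islem_tipi : String) (changes : List (List (String × String))) : Prop :=
  islem_tipi = "INSERT" ∨ islem_tipi = "DELETE" ∨
    ∀ c ∈ changes, ((PySem.Dict.mk c).get? "alan").isSome = true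
instance (islem_tipi : String) (changes : List (List (String × String))) : Decidable (Pre_normalize_event_type_py islem_tipi changes) := by unfold Pre_normalize_event_type_py; infer_instance

def pvWitness_normalize_event_type_py : String × (List (List (String × String))) :=
  ("edit", [[("alan", "durum")], [("alan", "x")]])

def Spec_normalize_event_type_py (islem_tipi : String) (changes : List (List (String × String))) (out : String) : Prop := out = normalize_event_type_py_alt islem_tipi changes
instance (islem_tipi : String) (changes : List (List (String × String))) (out : String) : Decidable (Spec_normalize_event_type_py islem_tipi changes out) := by unfold Spec_normalize_event_type_py; infer_instance

-- ===== CLAIM (what is proved, stated in full; the proofs are below) =====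
def Claim_equal_normalize_event_type_py : Prop := ∀ (islem_tipi : String) (changes : List (List (String × String))), Dom_normalize_event_type_py islem_tipi changes → Pre_normalize_event_type_py islem_tipi changes → Spec_normalize_event_type_py islem_tipi changes (normalize_event_type_py islem_tipi changes)

-- ===== LEMMAS AND PROOFS =====

-- The rank table as a plain conditional.
theorem pvRANK_getD (x : String) :
    pvRANK.getD x 3 =
      if "durum" = x then 0
      else if "tahmini_tuketim" = x then 1
      else if "tahmin_meta" = x then 1
      else if "tuketim" = x then 2
      else if "dagitilan_yakit" = x then 2
      else if "periyot_id" = x then 2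
      else 3 := by
  rw [PySem.Dict.getD_eq_get?_getD]
  simp only [pvRANK, PySem.Dict.get?_mk_cons, beq_iff_eq]
  split_ifs <;> rfl

theorem pvRank_bounds (x : String) : 0 ≤ pvRANK.getD x 3 ∧ pvRANK.getD x 3 ≤ 3 := by
  rw [pvRANK_getD]; split_ifs <;> omega

theorem rk_eq_zero_iff (x : String) : pvRANK.getD x 3 = 0 ↔ x = "durum" := by
  rw [pvRANK_getD]; split_ifs <;> simp_all [eq_comm]

theorem rk_eq_one_iff (x : String) :
    pvRANK.getD x 3 = 1 ↔ x = "tahmini_tuketim" ∨ x = "tahmin_meta" := by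
  rw [pvRANK_getD]; split_ifs <;> simp_all [eq_comm]

theorem rk_eq_two_iff (x : String) :
    pvRANK.getD x 3 = 2 ↔ x = "tuketim" ∨ x = "dagitilan_yakit" ∨ x = "periyot_id" := by
  rw [pvRANK_getD]; split_ifs <;> simp_all [eq_comm]

-- Characterisation of B's fold: the minimum rank present, as a membership chain.
theorem fold_char (l : List (List (String × String))) (b : Int) (hb : b ≤ 3) :
    l.foldl (fun b c => min b (pvRANK.getD (pvAlan c) 3)) b =
      if ∃ c ∈ l, pvRANK.getD (pvAlan c) 3 = 0 then min b 0
      else if ∃ c ∈ l, pvRANK.getD (pvAlan c) 3 = 1 then min b 1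
      else if ∃ c ∈ l, pvRANK.getD (pvAlan c) 3 = 2 then min b 2
      else b := by
  induction l generalizing b with
  | nil => simp
  | cons c l ih =>
    have hc := pvRank_bounds (pvAlan c)
    simp only [List.foldl_cons,
      ih (min b (pvRANK.getD (pvAlan c) 3)) (by omega), List.mem_cons]
    have h4 : pvRANK.getD (pvAlan c) 3 = 0 ∨ pvRANK.getD (pvAlan c) 3 = 1 ∨
        pvRANK.getD (pvAlan c) 3 = 2 ∨ pvRANK.getD (pvAlan c) 3 = 3 := by omega
    rcases h4 with h | h | h | h <;> simp [h] <;> split_ifs <;> omega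

theorem normalize_event_type_py_equal (islem_tipi : String)
    (changes : List (List (String × String))) :
    normalize_event_type_py islem_tipi changes = normalize_event_type_py_alt islem_tipi changes := by
  unfold normalize_event_type_py normalize_event_type_py_alt
  by_cases h1 : islem_tipi = "INSERT"
  · simp [h1]
  by_cases h2 : islem_tipi = "DELETE"
  · simp [h1, h2]
  simp only [h1, h2, if_false]
  rw [fold_char changes 3 (by omega)]
  have hm : ∀ s : String, (PySem.Set.contains (PySem.Set.ofList (changes.map pvAlan)) s = true)
      ↔ ∃ c ∈ changes, pvAlan c = s := by
    intro s
    rw [PySem.Set.contains_iff, PySem.Set.mem_ofList]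
    simp [List.mem_map, eq_comm]
  have hinter : (PySem.Set.inter (PySem.Set.ofList ["tuketim", "dagitilan_yakit", "periyot_id"])
      (PySem.Set.ofList (changes.map pvAlan)) ≠ []) ↔
      (∃ c ∈ changes, pvAlan c = "tuketim") ∨ (∃ c ∈ changes, pvAlan c = "dagitilan_yakit") ∨
        (∃ c ∈ changes, pvAlan c = "periyot_id") := by
    rw [Ne, List.eq_nil_iff_forall_not_mem]
    push_neg
    constructor
    · rintro ⟨y, hy⟩
      rw [PySem.Set.mem_inter, PySem.Set.mem_ofList, PySem.Set.mem_ofList, List.mem_map] at hy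
      obtain ⟨hy1, c, hc, hce⟩ := hy
      simp only [List.mem_cons, List.mem_singleton, List.not_mem_nil, or_false] at hy1
      rcases hy1 with h | h | h
      · exact Or.inl ⟨c, hc, by rw [hce, h]⟩
      · exact Or.inr (Or.inl ⟨c, hc, by rw [hce, h]⟩)
      · exact Or.inr (Or.inr ⟨c, hc, by rw [hce, h]⟩)
    · rintro (⟨c, hc, he⟩ | ⟨c, hc, he⟩ | ⟨c, hc, he⟩) <;>
        refine ⟨pvAlan c, ?_⟩ <;>
        rw [PySem.Set.mem_inter, PySem.Set.mem_ofList, PySem.Set.mem_ofList, List.mem_map] <;>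
        exact ⟨by simp [he], c, hc, rfl⟩
  by_cases p0 : ∃ c ∈ changes, pvAlan c = "durum" <;>
  by_cases pa : ∃ c ∈ changes, pvAlan c = "tahmini_tuketim" <;>
  by_cases pb : ∃ c ∈ changes, pvAlan c = "tahmin_meta" <;>
  by_cases pc : ∃ c ∈ changes, pvAlan c = "tuketim" <;>
  by_cases pd : ∃ c ∈ changes, pvAlan c = "dagitilan_yakit" <;>
  by_cases pe : ∃ c ∈ changes, pvAlan c = "periyot_id"
  all_goals simp [hm, hinter, p0, pa, pb, pc, pd, pe,
      rk_eq_zero_iff, rk_eq_one_iff, rk_eq_two_iff, and_or_left, exists_or] <;> decide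

-- ===== VERDICT (by name: the statement is the Claim_ definition above) =====
theorem normalize_event_type_py_spec : Claim_equal_normalize_event_type_py := by
  intro islem_tipi changes _ _
  unfold Spec_normalize_event_type_py
  exact normalize_event_type_py_equal islem_tipi changes
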